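-- pv_equiv track=rewrite | github.com/jongpark1234/Baekjoon | 23000/baekjoon_23277.py | calc
-- ===== SOURCE A (Python) =====
-- def calc(seg, a, b):
--     ret = 0
--     left, right = 0, len(seg)
--     while left < right:
--         mid = left + right >> 1
--         if seg[mid][1] <= a:
--             left = mid + 1
--         else:
--             right = mid
--     while left < len(seg):
--         l, r, temp = seg[left]
--         if l >= b:
--             break
--         x, y = max(l, a), min(r, b)
--         if x < y:
--             ret += (y - x) * temp
--         left += 1
--     return ret
-- ===== SOURCE B (Python) =====
-- def _find(rs, a, lo, hi):
--     if lo >= hi: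
--         return lo
--     mid = (lo + hi) // 2
--     if rs[mid] <= a:
--         return _find(rs, a, mid + 1, hi)
--     return _find(rs, a, lo, mid)
--
-- def calc(seg, a, b):
--     n = len(seg)
--     start = _find([r for _, r, _ in seg], a, 0, n)
--     stop = next((i for i in range(start, n) if seg[i][0] >= b), n)
--     return sum(max(0, min(r, b) - max(l, a)) * t for l, r, t in seg[start:stop])
-- ===== Notes on version B (the rewrite author's own statement) =====
-- stated objective: simpler
-- what changed: B replaces A's fused while-loops-with-mutable-state by a three-stage pipeline: a recursive bisect over the extracted list of right endpoints, a direct search for the first segment starting at or past b, and a one-line sum of clamped overlaps max(0, min(r,b)-max(l,a))*t over the slice, removing the in-loop break and the x<y guard.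
import Mathlib
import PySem

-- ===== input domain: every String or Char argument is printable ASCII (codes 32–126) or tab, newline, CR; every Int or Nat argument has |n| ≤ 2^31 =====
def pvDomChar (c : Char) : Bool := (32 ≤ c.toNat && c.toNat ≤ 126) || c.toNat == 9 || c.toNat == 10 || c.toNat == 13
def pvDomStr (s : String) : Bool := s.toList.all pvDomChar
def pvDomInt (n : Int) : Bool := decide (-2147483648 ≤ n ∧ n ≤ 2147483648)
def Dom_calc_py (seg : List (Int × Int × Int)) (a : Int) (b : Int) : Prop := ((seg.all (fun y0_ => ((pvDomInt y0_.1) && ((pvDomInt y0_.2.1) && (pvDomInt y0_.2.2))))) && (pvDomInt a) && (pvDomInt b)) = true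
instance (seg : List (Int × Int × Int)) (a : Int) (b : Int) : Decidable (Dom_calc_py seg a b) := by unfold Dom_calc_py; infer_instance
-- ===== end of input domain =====

-- B: the same weighted-overlap sum, written as a pipeline (recursive bisect, first-index
-- search, sum of clamped overlaps over a slice) instead of A's two mutable while-loops;
-- objective: simpler.

-- ===== PORT A =====
-- first while loop of A: binary search; indices stay in [0, seg.length] so seg[mid]? is
-- always some in reachable calls (the none branch is unreachable for the initial call)
def calcFind (seg : List (Int × Int × Int)) (a : Int) (left right : Nat) : Nat :=
  if _h : left < right then
    let mid := (left + right) / 2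
    match seg[mid]? with
    | some (_, r, _) =>
      if r ≤ a then calcFind seg a (mid + 1) right else calcFind seg a left mid
    | none => left
  else left
termination_by right - left
decreasing_by all_goals omega

-- second while loop of A: linear scan with break accumulating ret
def calcScan (seg : List (Int × Int × Int)) (a b : Int) (left : Nat) (ret : Int) : Int :=
  if _h : left < seg.length then
    match seg[left]? with
    | some (l, r, t) =>
      if b ≤ l then ret
      else
        let x := max l a
        let y := min r b
        calcScan seg a b (left + 1) (if x < y then ret + (y - x) * t else ret)
    | none => ret
  else ret
termination_by seg.length - left

def calc_py (seg : List (Int × Int × Int)) (a : Int) (b : Int) : Int :=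
  calcScan seg a b (calcFind seg a 0 seg.length) 0

-- ===== PORT B =====
-- Source B's recursive _find; rs.getD mid 0 ports rs[mid] (always in range in Source B's calls)
def altFind (rs : List Int) (a : Int) (lo hi : Nat) : Nat :=
  if _h : lo < hi then
    let mid := (lo + hi) / 2
    if rs.getD mid 0 ≤ a then altFind rs a (mid + 1) hi else altFind rs a lo mid
  else lo
termination_by hi - lo
decreasing_by all_goals omega

-- Source B's `next((i for i in range(start, n) if seg[i][0] >= b), n)`
def altStop (seg : List (Int × Int × Int)) (b : Int) (start n : Nat) : Nat :=
  (((List.range' start (n - start)).find? (fun i => decide (b ≤ (seg.getD i (0, 0, 0)).1))).getD n)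

def calc_py_alt (seg : List (Int × Int × Int)) (a : Int) (b : Int) : Int :=
  let n := seg.length
  let start := altFind (seg.map (fun s => s.2.1)) a 0 n
  let stop := altStop seg b start n
  (((seg.drop start).take (stop - start)).map
    (fun s => max 0 (min s.2.1 b - max s.1 a) * s.2.2)).sum

-- ===== PRECONDITION & SPEC =====
def Spec_calc_py (seg : List (Int × Int × Int)) (a : Int) (b : Int) (out : Int) : Prop := out = calc_py_alt seg a b
instance (seg : List (Int × Int × Int)) (a : Int) (b : Int) (out : Int) : Decidable (Spec_calc_py seg a b out) := by unfold Spec_calc_py; infer_instance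

-- ===== CLAIM (what is proved, stated in full; the proofs are below) =====
def Claim_equal_calc_py : Prop := ∀ (seg : List (Int × Int × Int)) (a : Int) (b : Int), Dom_calc_py seg a b → Spec_calc_py seg a b (calc_py seg a b)

-- ===== LEMMAS AND PROOFS =====

-- the two binary searches make identical comparisons, hence return the same index
lemma find_eq (seg : List (Int × Int × Int)) (a : Int) :
    ∀ k lo hi, hi - lo ≤ k → hi ≤ seg.length →
      calcFind seg a lo hi = altFind (seg.map (fun s => s.2.1)) a lo hi := by
  intro k
  induction k with
  | zero =>
    intro lo hi hk _
    rw [calcFind, altFind]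
    simp only [dif_neg (by omega : ¬ lo < hi)]
  | succ k ih =>
    intro lo hi hk hlen
    rw [calcFind, altFind]
    by_cases h : lo < hi
    · simp only [dif_pos h]
      have hmid : (lo + hi) / 2 < seg.length := by omega
      have hget : seg[(lo + hi) / 2]? = some seg[(lo + hi) / 2] :=
        List.getElem?_eq_getElem hmid
      have hgetD : (seg.map (fun s => s.2.1)).getD ((lo + hi) / 2) 0
          = seg[(lo + hi) / 2].2.1 := by
        rw [List.getD_eq_getElem?_getD, List.getElem?_map, hget]
        rfl
      rw [hget, hgetD]
      rcases hv : seg[(lo + hi) / 2] with ⟨l, r, t⟩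
      simp only
      by_cases hr : r ≤ a
      · simp only [if_pos hr]
        exact ih ((lo + hi) / 2 + 1) hi (by omega) hlen
      · simp only [if_neg hr]
        exact ih lo ((lo + hi) / 2) (by omega) (by omega)
    · simp only [dif_neg h]

-- the stop index is at least the start of its search range
lemma altStop_ge (seg : List (Int × Int × Int)) (b : Int) (i n : Nat) (h : i ≤ n) :
    i ≤ altStop seg b i n := by
  unfold altStop
  rcases hf : (List.range' i (n - i)).find? (fun j => decide (b ≤ (seg.getD j (0, 0, 0)).1)) with _ | j
  · simpa using h
  · have hmem := List.mem_of_find?_eq_some hf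
    have := (List.mem_range'_1.mp hmem).1
    simpa using this

-- when segment i does not start at/after b, the search continues from i+1
lemma altStop_succ (seg : List (Int × Int × Int)) (b : Int) (i n : Nat)
    (hi : i < n) (hlt : ¬ b ≤ (seg.getD i (0, 0, 0)).1) :
    altStop seg b i n = altStop seg b (i + 1) n := by
  unfold altStop
  have hrange : n - i = (n - (i + 1)) + 1 := by omega
  rw [hrange, List.range'_succ, List.find?_cons_of_neg]
  simpa using hlt

-- when segment i starts at/after b, the search stops at i
lemma altStop_stop (seg : List (Int × Int × Int)) (b : Int) (i n : Nat)
    (hi : i < n) (hge : b ≤ (seg.getD i (0, 0, 0)).1) :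
    altStop seg b i n = i := by
  unfold altStop
  have hrange : n - i = (n - (i + 1)) + 1 := by omega
  rw [hrange, List.range'_succ, List.find?_cons_of_pos]
  · rfl
  · simpa using hge

-- A's scan equals ret plus B's sum over the slice [i, altStop i)
lemma scan_eq (seg : List (Int × Int × Int)) (a b : Int) :
    ∀ k i ret, seg.length - i ≤ k →
      calcScan seg a b i ret
        = ret + (((seg.drop i).take (altStop seg b i seg.length - i)).map
            (fun s => max 0 (min s.2.1 b - max s.1 a) * s.2.2)).sum := by
  intro k
  induction k with
  | zero =>
    intro i ret hk
    have hge : seg.length ≤ i := by omega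
    rw [calcScan]
    simp [List.drop_eq_nil_of_le hge, dif_neg (by omega : ¬ i < seg.length)]
  | succ k ih =>
    intro i ret hk
    rw [calcScan]
    by_cases h : i < seg.length
    · simp only [dif_pos h]
      have hget : seg[i]? = some seg[i] := List.getElem?_eq_getElem h
      have hgetD : seg.getD i (0, 0, 0) = seg[i] := by
        rw [List.getD_eq_getElem?_getD, hget]; rfl
      rw [hget]
      rcases hv : seg[i] with ⟨l, r, t⟩
      simp only
      by_cases hb : b ≤ l
      · simp only [if_pos hb]
        have hstop : altStop seg b i seg.length = i := by
          apply altStop_stop seg b i seg.length h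
          rw [hgetD, hv]; exact hb
        simp [hstop]
      · simp only [if_neg hb]
        have hstop : altStop seg b i seg.length = altStop seg b (i + 1) seg.length := by
          apply altStop_succ seg b i seg.length h
          rw [hgetD, hv]; exact hb
        have hge : i + 1 ≤ altStop seg b (i + 1) seg.length :=
          altStop_ge seg b (i + 1) seg.length (by omega)
        have hdrop : seg.drop i = seg[i] :: seg.drop (i + 1) :=
          List.drop_eq_getElem_cons h
        have htake : altStop seg b i seg.length - i
            = (altStop seg b (i + 1) seg.length - (i + 1)) + 1 := by
          rw [hstop]; omega
        rw [ih (i + 1) _ (by omega), hdrop, hv, htake]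
        simp only [List.take_succ_cons, List.map_cons, List.sum_cons]
        by_cases hxy : max l a < min r b
        · simp only [if_pos hxy]
          have : max 0 (min r b - max l a) = min r b - max l a := by omega
          rw [this]; ring
        · simp only [if_neg hxy]
          have : max 0 (min r b - max l a) = 0 := by omega
          rw [this]; ring
    · simp only [dif_neg h]
      have hge : seg.length ≤ i := by omega
      simp [List.drop_eq_nil_of_le hge]

-- ===== VERDICT (by name: the statement is the Claim_ definition above) =====
theorem calc_py_spec : Claim_equal_calc_py := by
  intro seg a b _
  unfold Spec_calc_py calc_py calc_py_alt
  rw [find_eq seg a seg.length 0 seg.length (by omega) le_rfl]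
  rw [scan_eq seg a b seg.length (altFind (seg.map (fun s => s.2.1)) a 0 seg.length) 0
    (by omega)]
  ring
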